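-- pv_equiv track=rewrite | github.com/Pragmatismo/Pigrow | scripts/autorun/trigger_watcher.py | get_item_from_line
-- ===== SOURCE A (Python) =====
-- def get_item_from_line(line, key):
--     split_chr = ">"
--     second_split_chr = "="
--
--     if not line or split_chr not in line:
--         return None
--
--     for token in line.split(split_chr):
--         if second_split_chr in token:
--             k, v = token.split(second_split_chr, 1)
--             if k.strip() == key:
--                 return v.strip()
--     return None
-- ===== SOURCE B (Python) =====
-- def get_item_from_line(line, key):
--     if not line or ">" not in line:
--         return None
--     kbuf, vbuf, seen_eq = [], [], False
--     for ch in line + ">":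
--         if ch == ">":
--             if seen_eq and "".join(kbuf).strip() == key:
--                 return "".join(vbuf).strip()
--             kbuf, vbuf, seen_eq = [], [], False
--         elif ch == "=" and not seen_eq:
--             seen_eq = True
--         elif seen_eq:
--             vbuf.append(ch)
--         else:
--             kbuf.append(ch)
--     return None
-- ===== Notes on version B (the rewrite author's own statement) =====
-- stated objective: alternative
-- what changed: Replaces A's split('>')/split('=',1) token scan by a single character-level state machine over line+'>' that accumulates key/value buffers and checks a candidate pair whenever it hits '>', never calling split.
import Mathlib
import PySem

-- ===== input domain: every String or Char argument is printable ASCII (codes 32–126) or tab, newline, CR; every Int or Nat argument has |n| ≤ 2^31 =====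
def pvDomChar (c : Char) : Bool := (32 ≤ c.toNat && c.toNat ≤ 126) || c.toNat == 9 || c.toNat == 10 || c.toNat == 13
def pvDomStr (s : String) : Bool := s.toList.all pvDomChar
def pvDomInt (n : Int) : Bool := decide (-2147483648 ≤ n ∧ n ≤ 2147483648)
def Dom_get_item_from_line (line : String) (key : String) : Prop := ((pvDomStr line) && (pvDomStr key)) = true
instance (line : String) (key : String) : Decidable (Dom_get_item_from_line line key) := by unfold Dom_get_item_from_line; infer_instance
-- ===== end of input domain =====

-- B replaces A's split('>')/split('=',1) token scan by one character-level state machine over line+'>' (alternative algorithm, same return value, no speed claim).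

-- ===== PORT A =====
-- A's for-loop over line.split('>') with early return at the first matching key
def getItemScanA (key : String) : List String → Option String
  | [] => none
  | token :: ts =>
    if PySem.Str.isIn "=" token then
      match PySem.Str.splitMax? token "=" 1 with
      | some [k, v] =>
        if PySem.Str.strip k == key then some (PySem.Str.strip v) else getItemScanA key ts
      | _ => getItemScanA key ts
    else getItemScanA key ts

def get_item_from_line (line : String) (key : String) : Option String :=
  if line == "" || !(PySem.Str.isIn ">" line) then none
  else getItemScanA key ((PySem.Str.splitMax? line ">" (-1)).getD [])

-- ===== PORT B =====
-- B's 'for ch in line + ">"' loop: state = (key buffer, value buffer, seen_eq flag)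
def machB (key : List Char) : List Char → List Char → List Char → Bool → Option (List Char)
  | [], _, _, _ => none
  | c :: cs, kb, vb, seen =>
    if c == '>' then
      if seen && (PySem.Chars.strip kb == key) then some (PySem.Chars.strip vb)
      else machB key cs [] [] false
    else if c == '=' && !seen then machB key cs kb vb true
    else if seen then machB key cs kb (vb ++ [c]) true
    else machB key cs (kb ++ [c]) vb false

def get_item_from_line_alt (line : String) (key : String) : Option String :=
  if line == "" || !(PySem.Str.isIn ">" line) then none
  else (machB key.toList (line.toList ++ ['>']) [] [] false).map String.ofList

-- ===== PRECONDITION & SPEC =====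
def Spec_get_item_from_line (line : String) (key : String) (out : Option String) : Prop := out = get_item_from_line_alt line key
instance (line : String) (key : String) (out : Option String) : Decidable (Spec_get_item_from_line line key out) := by unfold Spec_get_item_from_line; infer_instance

-- ===== CLAIM (what is proved, stated in full; the proofs are below) =====
def Claim_equal_get_item_from_line : Prop := ∀ (line : String) (key : String), Dom_get_item_from_line line key → Spec_get_item_from_line line key (get_item_from_line line key)

-- ===== LEMMAS AND PROOFS =====

-- split a char list at every occurrence of sep: (first piece, remaining pieces)
def splitC (sep : Char) : List Char → List Char × List (List Char)
  | [] => ([], [])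
  | c :: cs =>
    let p := splitC sep cs
    if c = sep then ([], p.1 :: p.2) else (c :: p.1, p.2)

-- split at the FIRST '=' only
def splitFirstEq : List Char → Option (List Char × List Char)
  | [] => none
  | c :: cs => if c = '=' then some ([], cs) else (splitFirstEq cs).map (fun p => (c :: p.1, p.2))

-- what A's loop body returns for one token (none = no match, keep scanning)
def firstTok (key : List Char) (t : List Char) : Option (List Char) :=
  match splitFirstEq t with
  | some (k, v) => if PySem.Chars.strip k = key then some (PySem.Chars.strip v) else none
  | none => none

-- A's whole scan, on char lists
def scanC (key : List Char) : List (List Char) → Option (List Char)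
  | [] => none
  | t :: ts => (firstTok key t).or (scanC key ts)

theorem splitFirstEq_eq_none_iff (t : List Char) : splitFirstEq t = none ↔ '=' ∉ t := by
  induction t with
  | nil => simp [splitFirstEq]
  | cons c cs ih =>
    simp only [splitFirstEq, List.mem_cons]
    by_cases h : c = '='
    · simp [h]
    · cases hs : splitFirstEq cs with
      | none => simp [h, Ne.symm h, ih.mp hs]
      | some p =>
        have hm : '=' ∈ cs := by
          by_contra hm
          rw [ih.mpr hm] at hs; cases hs
        simp [h, hm]

theorem splitFirstEq_append (kb rest : List Char) (h : '=' ∉ kb) :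
    splitFirstEq (kb ++ '=' :: rest) = some (kb, rest) := by
  induction kb with
  | nil => simp [splitFirstEq]
  | cons c cs ih =>
    have hc : c ≠ '=' := fun hc => h (hc ▸ List.mem_cons_self ..)
    simp only [List.cons_append, splitFirstEq, if_neg hc,
      ih (fun hm => h (List.mem_cons_of_mem _ hm)), Option.map_some]

theorem isIn_singleton (a : Char) (l : List Char) : PySem.Chars.isIn [a] l = true ↔ a ∈ l := by
  rw [PySem.Chars.isIn_iff_infix]
  constructor
  · intro h; exact List.singleton_sublist.mp h.sublist
  · intro h; obtain ⟨s, t, rfl⟩ := List.append_of_mem h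
    exact ⟨s, t, by simp⟩

-- splitOn.go with a singleton separator, characterised by splitC
theorem splitOn_go_singleton (sep : Char) (fuel : Nat) :
    ∀ (l cur : List Char) (acc : List (List Char)), l.length ≤ fuel →
      PySem.Chars.splitOn.go [sep] fuel l cur acc =
        acc.reverse ++ (cur.reverse ++ (splitC sep l).1) :: (splitC sep l).2 := by
  induction fuel with
  | zero =>
    intro l cur acc h
    have : l = [] := List.eq_nil_of_length_eq_zero (Nat.le_zero.mp h)
    subst this; simp [PySem.Chars.splitOn.go, splitC]
  | succ fuel ih =>
    intro l cur acc h
    cases l with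
    | nil => simp [PySem.Chars.splitOn.go, splitC]
    | cons c rest =>
      by_cases hc : c = sep
      · subst hc
        rw [show PySem.Chars.splitOn.go [c] (fuel+1) (c :: rest) cur acc =
            PySem.Chars.splitOn.go [c] fuel (List.drop 1 (c :: rest)) [] (cur.reverse :: acc) by
          simp [PySem.Chars.splitOn.go, List.isPrefixOf]]
        rw [List.drop_one, List.tail_cons, ih rest [] (cur.reverse :: acc) (by simpa using h)]
        simp [splitC]
      · rw [show PySem.Chars.splitOn.go [sep] (fuel+1) (c :: rest) cur acc =
            PySem.Chars.splitOn.go [sep] fuel rest (c :: cur) acc by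
          simp [PySem.Chars.splitOn.go, List.isPrefixOf, Ne.symm hc]]
        rw [ih rest (c :: cur) acc (by simpa using h)]
        simp [splitC, hc]

theorem splitOn_singleton (sep : Char) (l : List Char) :
    PySem.Chars.splitOn l [sep] = (splitC sep l).1 :: (splitC sep l).2 := by
  unfold PySem.Chars.splitOn
  rw [splitOn_go_singleton sep (l.length + 1) l [] [] (Nat.le_succ _)]
  simp

-- splitOnMax.go with maxsplit budget 0 just flushes the buffer
theorem splitOnMax_go_zero (sep : List Char) (fuel : Nat) :
    ∀ (l cur : List Char) (acc : List (List Char)),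
      PySem.Chars.splitOnMax.go sep fuel 0 l cur acc = acc.reverse ++ [cur.reverse ++ l] := by
  induction fuel with
  | zero => intro l cur acc; simp [PySem.Chars.splitOnMax.go]
  | succ fuel _ =>
    intro l cur acc
    cases l with
    | nil => simp [PySem.Chars.splitOnMax.go]
    | cons c rest => simp [PySem.Chars.splitOnMax.go]

-- splitOnMax.go with budget 1 and separator '=', characterised by splitFirstEq
theorem splitOnMax_go_one (fuel : Nat) :
    ∀ (l cur : List Char) (acc : List (List Char)), l.length ≤ fuel →
      PySem.Chars.splitOnMax.go ['='] fuel 1 l cur acc =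
        acc.reverse ++ (match splitFirstEq l with
          | some (k, v) => [cur.reverse ++ k, v]
          | none => [cur.reverse ++ l]) := by
  induction fuel with
  | zero =>
    intro l cur acc h
    have : l = [] := List.eq_nil_of_length_eq_zero (Nat.le_zero.mp h)
    subst this; simp [PySem.Chars.splitOnMax.go, splitFirstEq]
  | succ fuel ih =>
    intro l cur acc h
    cases l with
    | nil => simp [PySem.Chars.splitOnMax.go, splitFirstEq]
    | cons c rest =>
      by_cases hc : c = '='
      · subst hc
        rw [show PySem.Chars.splitOnMax.go ['='] (fuel+1) 1 ('=' :: rest) cur acc =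
            PySem.Chars.splitOnMax.go ['='] fuel 0 (List.drop 1 ('=' :: rest)) [] (cur.reverse :: acc) by
          simp [PySem.Chars.splitOnMax.go, List.isPrefixOf]]
        rw [List.drop_one, List.tail_cons, splitOnMax_go_zero ['='] fuel rest [] (cur.reverse :: acc)]
        simp [splitFirstEq]
      · rw [show PySem.Chars.splitOnMax.go ['='] (fuel+1) 1 (c :: rest) cur acc =
            PySem.Chars.splitOnMax.go ['='] fuel 1 rest (c :: cur) acc by
          simp [PySem.Chars.splitOnMax.go, List.isPrefixOf, Ne.symm hc]]
        rw [ih rest (c :: cur) acc (by simpa using h)]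
        cases hs : splitFirstEq rest with
        | none => simp [splitFirstEq, hc, hs]
        | some p => simp [splitFirstEq, hc, hs]

theorem splitOnMax_one (t : List Char) :
    PySem.Chars.splitOnMax t ['='] 1 =
      (match splitFirstEq t with
        | some (k, v) => [k, v]
        | none => [t]) := by
  unfold PySem.Chars.splitOnMax
  rw [if_neg (by omega), show (1:Int).toNat = 1 from rfl]
  rw [splitOnMax_go_one (t.length + 1) t [] [] (Nat.le_succ _)]
  cases hs : splitFirstEq t with
  | none => simp
  | some p => simp

-- the state machine over cs ++ ['>'], in both seen_eq states, characterised by splitC: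
-- seen_eq=True: the value buffer runs to the next '>'; seen_eq=False (with an '='-free key
-- buffer and empty value buffer): the current token behaves like A's loop body, then the rest
theorem machB_both (key : List Char) (cs : List Char) :
    (∀ kb vb : List Char,
      machB key (cs ++ ['>']) kb vb true =
        ((if PySem.Chars.strip kb = key
            then some (PySem.Chars.strip (vb ++ (splitC '>' cs).1)) else none).or
          (scanC key (splitC '>' cs).2))) ∧
    (∀ kb : List Char, '=' ∉ kb →
      machB key (cs ++ ['>']) kb [] false =
        ((firstTok key (kb ++ (splitC '>' cs).1)).or (scanC key (splitC '>' cs).2))) := by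
  induction cs with
  | nil =>
    constructor
    · intro kb vb
      simp only [List.nil_append, machB, beq_self_eq_true, if_true, splitC, scanC]
      by_cases hk : PySem.Chars.strip kb = key
      · simp [hk]
      · simp [hk]
    · intro kb hkb
      have h0 := (splitFirstEq_eq_none_iff kb).mpr hkb
      simp [machB, splitC, scanC, firstTok, h0]
  | cons c cs ih =>
    constructor
    · intro kb vb
      by_cases hc : c = '>'
      · subst hc
        simp only [List.cons_append, machB, beq_self_eq_true, if_true, splitC]
        by_cases hk : PySem.Chars.strip kb = key
        · simp [hk]
        · rw [if_neg (by simp [hk])]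
          rw [ih.2 [] (by simp)]
          simp [hk, scanC]
      · have hstep : machB key ((c :: cs) ++ ['>']) kb vb true =
            machB key (cs ++ ['>']) kb (vb ++ [c]) true := by
          simp [machB, hc]
        rw [hstep, ih.1 kb (vb ++ [c])]
        simp [splitC, hc]
    · intro kb hkb
      have h0 := (splitFirstEq_eq_none_iff kb).mpr hkb
      by_cases hc : c = '>'
      · subst hc
        simp only [List.cons_append, machB, beq_self_eq_true, if_true, Bool.false_and,
          splitC, List.append_nil]
        rw [ih.2 [] (by simp)]
        simp [firstTok, h0, scanC]
      · by_cases he : c = '='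
        · subst he
          have hstep : machB key (('=' :: cs) ++ ['>']) kb [] false =
              machB key (cs ++ ['>']) kb [] true := by
            simp [machB]
          rw [hstep, ih.1 kb []]
          have hft : firstTok key (kb ++ (splitC '>' ('=' :: cs)).1) =
              if PySem.Chars.strip kb = key then some (PySem.Chars.strip (splitC '>' cs).1)
              else none := by
            rw [show (splitC '>' ('=' :: cs)).1 = '=' :: (splitC '>' cs).1 by simp [splitC, hc]]
            rw [firstTok, splitFirstEq_append kb _ hkb]
          rw [hft]
          simp [splitC, hc]
        · have hstep : machB key ((c :: cs) ++ ['>']) kb [] false =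
              machB key (cs ++ ['>']) (kb ++ [c]) [] false := by
            simp [machB, hc, he]
          rw [hstep, ih.2 (kb ++ [c]) (by simp [hkb, Ne.symm he])]
          simp [splitC, hc]

-- A's string-level scan is scanC on the underlying char lists
theorem scanA_eq (key : String) (toks : List (List Char)) :
    getItemScanA key (toks.map String.ofList) = (scanC key.toList toks).map String.ofList := by
  induction toks with
  | nil => simp [getItemScanA, scanC]
  | cons t ts ih =>
    simp only [List.map_cons, getItemScanA, scanC]
    have hin : PySem.Str.isIn "=" (String.ofList t) = PySem.Chars.isIn ['='] t := by
      simp [PySem.Str.isIn]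
    by_cases hmem : '=' ∈ t
    · rw [hin, if_pos ((isIn_singleton '=' t).mpr hmem)]
      obtain ⟨⟨k, v⟩, hs⟩ : ∃ p, splitFirstEq t = some p := by
        cases hs : splitFirstEq t with
        | none => exact absurd ((splitFirstEq_eq_none_iff t).mp hs) (by simpa using hmem)
        | some p => exact ⟨p, rfl⟩
      have hsplit : PySem.Str.splitMax? (String.ofList t) "=" 1 =
          some [String.ofList k, String.ofList v] := by
        simp [PySem.Str.splitMax?, PySem.Chars.splitMax?, splitOnMax_one, hs]
      rw [hsplit]
      have hstrip : PySem.Str.strip (String.ofList k) = String.ofList (PySem.Chars.strip k) := by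
        simp [PySem.Str.strip]
      by_cases hk : PySem.Chars.strip k = key.toList
      · have : PySem.Str.strip (String.ofList k) == key := by
          rw [hstrip, beq_iff_eq]; exact String.ext (by simpa using hk)
        simp [firstTok, hs, hk, PySem.Str.strip]
      · have : ¬ (PySem.Str.strip (String.ofList k) == key) := by
          rw [hstrip, beq_iff_eq]
          intro hcon
          exact hk (by simpa using congrArg String.toList hcon)
        simp [this, ih, firstTok, hs, hk]
    · rw [hin, if_neg (by simpa using (fun h => hmem ((isIn_singleton '=' t).mp h)))]
      have hs : splitFirstEq t = none := (splitFirstEq_eq_none_iff t).mpr hmem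
      simp [ih, firstTok, hs]

-- ===== VERDICT (by name: the statement is the Claim_ definition above) =====
theorem get_item_from_line_spec : Claim_equal_get_item_from_line := by
  intro line key _
  unfold Spec_get_item_from_line get_item_from_line get_item_from_line_alt
  by_cases hguard : (line == "" || !(PySem.Str.isIn ">" line)) = true
  · rw [if_pos hguard, if_pos hguard]
  · rw [if_neg hguard, if_neg hguard]
    have hsplit : (PySem.Str.splitMax? line ">" (-1)).getD [] =
        (PySem.Chars.splitOn line.toList ['>']).map String.ofList := by
      simp [PySem.Str.splitMax?, PySem.Chars.splitMax?, PySem.Chars.splitOnMax]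
    rw [hsplit, scanA_eq, splitOn_singleton]
    rw [(machB_both key.toList line.toList).2 [] (by simp)]
    simp [scanC]
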